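-- pv_equiv track=rewrite | github.com/aylwyn/vcf-proc | vcf-proc.py | phasecombs
-- ===== SOURCE A (Python) =====
-- def phases(gt):
-- # diploid allele combinations
-- 	yield(gt[0] + gt[2])
-- 	if gt[1] != '|' and gt[0] != gt[2]:
-- #		yield(gt[::-1])
-- 		yield(gt[2] + gt[0])
--
-- def phasecombs(gts, sep = ''):
-- # different phase combinations of diploid genotypes in gts
-- 	if len(gts) > 1:
-- 		for cc in phasecombs(gts[1:], sep):
-- 			for ph in phases(gts[0]):
-- 				yield(sep.join((ph + cc)))
-- 	else:
-- 		for ph in phases(gts[0]):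
-- 			yield(ph)
-- ===== SOURCE B (Python) =====
-- def _phases(g):
--     # the two possible orientations of one diploid genotype, as a list
--     out = [g[0] + g[2]]
--     if g[1] != '|' and g[0] != g[2]:
--         out.append(g[2] + g[0])
--     return out
--
-- def phasecombs(gts, sep=''):
--     # iterative back-to-front accumulation instead of the recursive generator:
--     # start from the last genotype's phases and fold each earlier genotype in,
--     # keeping A's order (earlier genotypes vary fastest).
--     accs = _phases(gts[-1])
--     for g in reversed(gts[:-1]):
--         accs = [sep.join(ph + cc) for cc in accs for ph in _phases(g)]
--     yield from accs
-- ===== Notes on version B (the rewrite author's own statement) =====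
-- stated objective: alternative
-- what changed: Replaces A's recursive nested-generator decomposition by an iterative back-to-front accumulation: per-genotype phase options are materialised as lists and folded from the last genotype to the first with a list comprehension, preserving A's emission order.
import Mathlib
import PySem

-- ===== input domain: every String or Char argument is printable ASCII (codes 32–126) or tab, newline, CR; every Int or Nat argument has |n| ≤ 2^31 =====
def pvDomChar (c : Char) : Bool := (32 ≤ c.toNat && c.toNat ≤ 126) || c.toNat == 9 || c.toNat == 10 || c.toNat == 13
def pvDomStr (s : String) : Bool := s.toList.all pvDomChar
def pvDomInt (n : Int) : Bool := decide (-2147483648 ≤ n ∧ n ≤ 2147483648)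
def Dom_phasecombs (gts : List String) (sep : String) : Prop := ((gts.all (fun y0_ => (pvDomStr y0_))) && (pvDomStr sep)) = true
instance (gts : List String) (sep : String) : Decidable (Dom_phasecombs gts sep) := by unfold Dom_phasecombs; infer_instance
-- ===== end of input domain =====

-- B replaces A's recursive nested generators by an iterative back-to-front accumulation
-- over the genotype list (same output values and order); A's ports work on List Char.

-- exact port of Python `sep.join(s)` for a STRING s: interleave sep between the characters of s
def pvJoin (sep : List Char) : List Char → List Char
  | [] => []
  | [c] => [c]
  | c :: d :: rest => c :: (sep ++ pvJoin sep (d :: rest))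

-- ===== PORT A =====
-- generator `phases(gt)` collected into a list: yields gt[0]+gt[2], then maybe gt[2]+gt[0];
-- a gt of length < 3 raises IndexError in Python (excluded by Pre_), here: no yields
def pvPhasesA (g : List Char) : List (List Char) :=
  match g with
  | c0 :: c1 :: c2 :: _ =>
      if c1 ≠ '|' ∧ c0 ≠ c2 then [[c0, c2], [c2, c0]] else [[c0, c2]]
  | _ => []

-- recursive generator `phasecombs` collected into a list; gts = [] raises in Python (excluded by Pre_)
def pvCombA : List (List Char) → List Char → List (List Char)
  | [], _ => []
  | [g], _ => pvPhasesA g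
  | g :: g1 :: rest, sep =>
      (pvCombA (g1 :: rest) sep).flatMap
        (fun cc => (pvPhasesA g).map (fun ph => pvJoin sep (ph ++ cc)))

def phasecombs (gts : List String) (sep : String) : List String :=
  (pvCombA (gts.map String.toList) sep.toList).map String.mk

-- ===== PORT B =====
-- `_phases(g)`: list literal then conditional append
def pvPhasesB (g : List Char) : List (List Char) :=
  match g with
  | c0 :: c1 :: c2 :: _ =>
      let out := [[c0, c2]]
      if c1 ≠ '|' ∧ c0 ≠ c2 then out ++ [[c2, c0]] else out
  | _ => []

-- body of B's list comprehension: one accumulation step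
def pvStep (sep : List Char) (accs : List (List Char)) (g : List Char) : List (List Char) :=
  accs.flatMap (fun cc => (pvPhasesB g).map (fun ph => pvJoin sep (ph ++ cc)))

-- `accs = _phases(gts[-1]); for g in reversed(gts[:-1]): accs = [...]`
def pvCombB (gts : List (List Char)) (sep : List Char) : List (List Char) :=
  match gts.reverse with
  | [] => []
  | last :: restRev => restRev.foldl (pvStep sep) (pvPhasesB last)

def phasecombs_alt (gts : List String) (sep : String) : List String :=
  (pvCombB (gts.map String.toList) sep.toList).map String.mk

-- ===== PRECONDITION & SPEC =====
-- exactly where Python A returns normally: a genotype string shorter than 3 characters,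
-- or an empty gts list, makes A's generator raise IndexError
def Pre_phasecombs (gts : List String) (sep : String) : Prop :=
  gts ≠ [] ∧ ∀ g ∈ gts, 3 ≤ g.toList.length
instance (gts : List String) (sep : String) : Decidable (Pre_phasecombs gts sep) := by
  unfold Pre_phasecombs; infer_instance
def pvWitness_phasecombs : List String × String := (["0/1", "1|1"], ",")

def Spec_phasecombs (gts : List String) (sep : String) (out : List String) : Prop := out = phasecombs_alt gts sep
instance (gts : List String) (sep : String) (out : List String) : Decidable (Spec_phasecombs gts sep out) := by unfold Spec_phasecombs; infer_instance

-- ===== CLAIM (what is proved, stated in full; the proofs are below) =====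
def Claim_equal_phasecombs : Prop := ∀ (gts : List String) (sep : String), Dom_phasecombs gts sep → Pre_phasecombs gts sep → Spec_phasecombs gts sep (phasecombs gts sep)

-- ===== LEMMAS AND PROOFS =====

theorem pvPhases_eq (g : List Char) : pvPhasesB g = pvPhasesA g := by
  unfold pvPhasesA pvPhasesB
  cases g with
  | nil => rfl
  | cons c0 t =>
    cases t with
    | nil => rfl
    | cons c1 t1 =>
      cases t1 with
      | nil => rfl
      | cons c2 t2 => dsimp only; split_ifs <;> rfl

theorem pvCombB_cons (g : List Char) (r : List (List Char)) (sep : List Char)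
    (hr : r ≠ []) : pvCombB (g :: r) sep = pvStep sep (pvCombB r sep) g := by
  obtain ⟨last, rr, hrev⟩ : ∃ last rr, r.reverse = last :: rr := by
    cases h : r.reverse with
    | nil => exact absurd (List.reverse_eq_nil_iff.mp h) hr
    | cons a b => exact ⟨a, b, rfl⟩
  unfold pvCombB
  rw [List.reverse_cons, hrev]
  simp [List.foldl_append]

theorem pvComb_eq (gts : List (List Char)) (sep : List Char) (h : gts ≠ []) :
    pvCombA gts sep = pvCombB gts sep := by
  induction gts with
  | nil => exact absurd rfl h
  | cons g r ih =>
    cases r with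
    | nil =>
      show pvPhasesA g = pvCombB [g] sep
      simp [pvCombB, pvPhases_eq]
    | cons g1 r1 =>
      rw [pvCombB_cons g (g1 :: r1) sep (by simp)]
      show (pvCombA (g1 :: r1) sep).flatMap
            (fun cc => (pvPhasesA g).map (fun ph => pvJoin sep (ph ++ cc)))
          = pvStep sep (pvCombB (g1 :: r1) sep) g
      rw [ih (by simp)]
      unfold pvStep
      simp [pvPhases_eq]

-- ===== VERDICT (by name: the statement is the Claim_ definition above) =====
theorem phasecombs_spec : Claim_equal_phasecombs := by
  intro gts sep _ hpre
  unfold Spec_phasecombs phasecombs phasecombs_alt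
  rw [pvComb_eq]
  intro h
  exact hpre.1 (List.map_eq_nil_iff.mp h)
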